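-- pv_equiv track=rewrite | github.com/neksor3/chart-dashboard | rates.py | _find_curve_near_date
-- ===== SOURCE A (Python) =====
-- def _find_curve_near_date(all_rows, target_date_str):
--     """Find the row closest to (but not after) target date."""
--     if not all_rows:
--         return None
--     best = None
--     for r in all_rows:
--         if r['date'] <= target_date_str:
--             best = r
--     return best
-- ===== SOURCE B (Python) =====
-- def _find_curve_near_date(all_rows, target_date_str):
--     """Scan the rows in reverse and return the first (i.e. last-in-order) row
--     whose 'date' is not after the target; None if there is none."""
--     for r in reversed(all_rows):
--         if r['date'] <= target_date_str:
--             return r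
--     return None
-- ===== Notes on version B (the rewrite author's own statement) =====
-- stated objective: alternative
-- what changed: Replaces the forward full scan with a keep-last accumulator by a reversed traversal that returns the first match immediately (early exit), dropping the accumulator and the empty-list guard.
import Mathlib
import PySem

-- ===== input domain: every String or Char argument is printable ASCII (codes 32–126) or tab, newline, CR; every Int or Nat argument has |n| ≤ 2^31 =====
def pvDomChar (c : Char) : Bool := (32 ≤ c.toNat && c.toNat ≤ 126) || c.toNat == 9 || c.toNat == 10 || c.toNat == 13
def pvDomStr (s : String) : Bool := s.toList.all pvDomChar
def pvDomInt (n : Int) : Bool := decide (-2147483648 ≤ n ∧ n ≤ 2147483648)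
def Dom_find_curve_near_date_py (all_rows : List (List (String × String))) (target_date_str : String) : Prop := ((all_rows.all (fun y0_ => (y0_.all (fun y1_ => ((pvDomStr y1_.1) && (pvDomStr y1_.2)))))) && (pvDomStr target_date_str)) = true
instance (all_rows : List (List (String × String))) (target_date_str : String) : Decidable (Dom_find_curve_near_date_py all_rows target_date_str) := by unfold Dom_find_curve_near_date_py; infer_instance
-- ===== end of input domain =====

-- B replaces A's forward keep-last scan by a reversed traversal with early exit; equivalence of RETURN values on rows that all carry a 'date' key.

-- shared helper: r['date'] (first-match lookup; only reached with the key present under Pre_)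
def pyDate (r : List (String × String)) : String := ((PySem.Dict.mk r).get? "date").getD ""

-- ===== PORT A =====
def find_curve_near_date_py (all_rows : List (List (String × String))) (target_date_str : String) : Option (List (String × String)) :=
  if all_rows = [] then none
  else all_rows.foldl (fun best r => if pyDate r ≤ target_date_str then some r else best) none

-- ===== PORT B =====
def pyRevFind (target_date_str : String) : List (List (String × String)) → Option (List (String × String))
  | [] => none
  | r :: rest => if pyDate r ≤ target_date_str then some r else pyRevFind target_date_str rest

def find_curve_near_date_py_alt (all_rows : List (List (String × String))) (target_date_str : String) : Option (List (String × String)) :=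
  pyRevFind target_date_str all_rows.reverse

-- ===== PRECONDITION & SPEC =====
-- Pre_ excludes rows missing the 'date' key, on which Python A raises KeyError.
def Pre_find_curve_near_date_py (all_rows : List (List (String × String))) (target_date_str : String) : Prop :=
  ∀ r ∈ all_rows, ((PySem.Dict.mk r).get? "date").isSome = true
instance (all_rows : List (List (String × String))) (target_date_str : String) : Decidable (Pre_find_curve_near_date_py all_rows target_date_str) := by unfold Pre_find_curve_near_date_py; infer_instance
def pvWitness_find_curve_near_date_py : (List (List (String × String))) × String := ([[("date", "2020-01-01")], [("date", "2021-05-05")]], "2020-12-31")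

def Spec_find_curve_near_date_py (all_rows : List (List (String × String))) (target_date_str : String) (out : Option (List (String × String))) : Prop := out = find_curve_near_date_py_alt all_rows target_date_str
instance (all_rows : List (List (String × String))) (target_date_str : String) (out : Option (List (String × String))) : Decidable (Spec_find_curve_near_date_py all_rows target_date_str out) := by unfold Spec_find_curve_near_date_py; infer_instance

-- ===== CLAIM (what is proved, stated in full; the proofs are below) =====
def Claim_equal_find_curve_near_date_py : Prop := ∀ (all_rows : List (List (String × String))) (target_date_str : String), Dom_find_curve_near_date_py all_rows target_date_str → Pre_find_curve_near_date_py all_rows target_date_str → Spec_find_curve_near_date_py all_rows target_date_str (find_curve_near_date_py all_rows target_date_str)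

-- ===== LEMMAS AND PROOFS =====

-- scanning l ++ [r] front-first: first look in l, then at r
theorem pyRevFind_append (t : String) (l : List (List (String × String))) (r : List (String × String)) :
    pyRevFind t (l ++ [r]) =
      match pyRevFind t l with
      | some x => some x
      | none => if pyDate r ≤ t then some r else none := by
  induction l with
  | nil => simp [pyRevFind]
  | cons a l ih =>
      simp only [List.cons_append, pyRevFind]
      by_cases h : pyDate a ≤ t <;> simp [h, ih]

-- A's keep-last fold equals B's reverse-first-match, for any accumulator
theorem foldl_eq_revFind (t : String) (rows : List (List (String × String))) (b : Option (List (String × String))) :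
    rows.foldl (fun best r => if pyDate r ≤ t then some r else best) b =
      match pyRevFind t rows.reverse with
      | some x => some x
      | none => b := by
  induction rows generalizing b with
  | nil => simp [pyRevFind]
  | cons r rest ih =>
      simp only [List.foldl_cons, List.reverse_cons, pyRevFind_append, ih]
      cases pyRevFind t rest.reverse <;> by_cases h : pyDate r ≤ t <;> simp [h]

-- ===== VERDICT (by name: the statement is the Claim_ definition above) =====
theorem find_curve_near_date_py_spec : Claim_equal_find_curve_near_date_py := by
  intro rows t _ _
  unfold Spec_find_curve_near_date_py find_curve_near_date_py find_curve_near_date_py_alt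
  by_cases h : rows = []
  · subst h; simp [pyRevFind]
  · rw [if_neg h, foldl_eq_revFind]
    cases pyRevFind t rows.reverse <;> simp
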